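-- pv_equiv track=rewrite | github.com/dmiyakawa/atcoder-workspace | abc146/C/main.py | solve
-- ===== SOURCE A (Python) =====
-- MIN_N = 1
--
-- MAX_N = 10 ** 9
--
-- def calc_price(A, B, n):
--     d = len(str(n))
--     return A * n + B * d
--
-- def solve(A, B, X):
--     left, right = MIN_N, MAX_N
--     answer = 0
--     while left <= right:
--         n = (left + right) // 2
--         price = calc_price(A, B, n)
--         if X == price:
--             answer = n
--             break
--         elif X < price:
--             right = n - 1
--         elif price < X:
--             answer = n
--             left = n + 1
--     return answer
-- ===== SOURCE B (Python) =====
-- def solve(A, B, X):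
--     # Closed-form scan over digit lengths instead of binary search:
--     # in the d-digit band, price is A*n + B*d, so the best n there is
--     # min(band_high, (X - B*d) // A) if it still lies in the band.
--     best = 0
--     lo = 1
--     for d in range(1, 11):
--         hi = min(10 ** d - 1, 10 ** 9)
--         cand = min(hi, (X - B * d) // A)
--         if cand >= lo:
--             best = max(best, cand)
--         lo = 10 ** d
--     return best
-- ===== Notes on version B (the rewrite author's own statement) =====
-- stated objective: alternative
-- what changed: Replaces the binary search over [1,10^9] (with len(str(n)) evaluated at every probe) by a closed-form scan over the 10 possible digit lengths d, taking min(band_high, (X-B*d)//A) per band.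
-- outside the precondition, e.g. on solve(1, -1, 99994): A returns 99999, B returns 100000; on solve(0, 1, 5): A returns 61035, B raises ZeroDivisionError
import Mathlib
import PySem

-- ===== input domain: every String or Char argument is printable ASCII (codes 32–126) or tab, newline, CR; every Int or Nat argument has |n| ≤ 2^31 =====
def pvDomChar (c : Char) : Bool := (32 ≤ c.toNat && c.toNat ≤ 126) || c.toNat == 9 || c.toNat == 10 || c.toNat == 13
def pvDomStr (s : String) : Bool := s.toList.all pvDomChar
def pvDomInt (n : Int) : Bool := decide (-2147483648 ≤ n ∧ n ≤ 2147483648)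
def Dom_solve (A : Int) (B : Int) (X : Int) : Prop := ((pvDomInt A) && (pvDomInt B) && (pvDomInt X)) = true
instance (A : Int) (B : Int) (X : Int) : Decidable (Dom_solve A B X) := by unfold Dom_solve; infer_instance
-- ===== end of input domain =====

-- B replaces A's binary search by a closed-form scan over the 10 possible digit lengths (alternative decomposition, same result on Pre_).

-- ===== PORT A =====
-- d = len(str(n)); return A * n + B * d
def calc_price (A : Int) (B : Int) (n : Int) : Int :=
  let d : Int := PySem.Str.len (PySem.Int.toStr n)
  A * n + B * d

-- the while-loop of A, state (left, right, answer)
def solveLoop (A : Int) (B : Int) (X : Int) (left : Int) (right : Int) (answer : Int) : Int :=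
  if h : left ≤ right then
    let n := PySem.Int.floordiv (left + right) 2
    let price := calc_price A B n
    if X = price then n          -- answer = n; break
    else if X < price then solveLoop A B X left (n - 1) answer
    else solveLoop A B X (n + 1) right n   -- price < X (the remaining case on Int)
  else answer
termination_by (right + 1 - left).toNat
decreasing_by
  · have := PySem.Int.floordiv_two_mid_bounds h; omega
  · have := PySem.Int.floordiv_two_mid_bounds h; omega

def solve (A : Int) (B : Int) (X : Int) : Int :=
  solveLoop A B X 1 (10 ^ 9) 0

-- ===== PORT B =====
-- for d in range(1, 11): band high = min(10**d - 1, 10**9); cand = min(hi, (X - B*d) // A);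
-- best = max(best, cand) if cand >= lo; lo = 10**d.  State of the fold: (best, lo).
-- (10 ** d is (10:Int) ^ d.toNat : exact for the nonnegative d this range yields)
def solve_alt (A : Int) (B : Int) (X : Int) : Int :=
  ((PySem.List.pyRange 1 11 1).foldl
    (fun (st : Int × Int) (d : Int) =>
      let hi := min ((10 : Int) ^ d.toNat - 1) (10 ^ 9)
      let cand := min hi (PySem.Int.floordiv (X - B * d) A)
      (if st.2 ≤ cand then max st.1 cand else st.1, (10 : Int) ^ d.toNat))
    (0, 1)).1

-- ===== PRECONDITION & SPEC =====
-- Pre_ narrows to 1 ≤ A and 1 ≤ A + B (this contains the AtCoder problem's whole constraint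
-- domain 1 ≤ A, 1 ≤ B): exactly there the price A*n + B*len(str(n)) is strictly increasing
-- in n, which A's binary search assumes; outside it A's returned value is an artefact of the
-- probe path (see the cited example) and B's floor division by A would raise on A = 0.
def Pre_solve (A : Int) (B : Int) (X : Int) : Prop := 1 ≤ A ∧ 1 ≤ A + B
instance (A : Int) (B : Int) (X : Int) : Decidable (Pre_solve A B X) := by unfold Pre_solve; infer_instance
def pvWitness_solve : Int × Int × Int := (3, 2, 100)

def Spec_solve (A : Int) (B : Int) (X : Int) (out : Int) : Prop := out = solve_alt A B X
instance (A : Int) (B : Int) (X : Int) (out : Int) : Decidable (Spec_solve A B X out) := by unfold Spec_solve; infer_instance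

-- ===== CLAIM (what is proved, stated in full; the proofs are below) =====
def Claim_equal_solve : Prop := ∀ (A : Int) (B : Int) (X : Int), Dom_solve A B X → Pre_solve A B X → Spec_solve A B X (solve A B X)

-- ===== LEMMAS AND PROOFS =====

-- the price function, written over Nat.toDigits (equal to calc_price for 0 ≤ n)
def fI (A : Int) (B : Int) (n : Int) : Int :=
  A * n + B * ((Nat.toDigits 10 n.toNat).length : Int)

lemma calc_price_eq (A B n : Int) (hn : 0 ≤ n) : calc_price A B n = fI A B n := by
  simp [calc_price, fI, PySem.Str.len_eq, PySem.Int.toList_toStr, PySem.Int.toChars,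
    Int.not_lt.mpr hn]

-- decimal length on a band
lemma dlen_band_nat (k n : Nat) (h1 : 10 ^ k ≤ n) (h2 : n < 10 ^ (k + 1)) :
    (Nat.toDigits 10 n).length = k + 1 := by
  have hb : (1 : Nat) < 10 := by norm_num
  have hle : (Nat.toDigits 10 n).length ≤ k + 1 :=
    (Nat.length_toDigits_le_iff hb (Nat.succ_pos k)).2 h2
  have hge : k + 1 ≤ (Nat.toDigits 10 n).length := by
    rcases Nat.eq_zero_or_pos k with hk | hk
    · subst hk; exact Nat.length_toDigits_pos
    · by_contra hlt
      have hlen : (Nat.toDigits 10 n).length ≤ k := by omega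
      have hnk : n < 10 ^ k := (Nat.length_toDigits_le_iff hb hk).1 hlen
      exact absurd (lt_of_le_of_lt h1 hnk) (lt_irrefl _)
  omega

lemma dlen_band (k : Nat) (m : Int) (h1 : (10 : Int) ^ k ≤ m) (h2 : m < 10 ^ (k + 1)) :
    ((Nat.toDigits 10 m.toNat).length : Int) = (k : Int) + 1 := by
  have hm : 0 ≤ m := le_trans (by positivity) h1
  have e1 : ((10 : Nat) ^ k : Int) ≤ m := by push_cast; exact h1
  have e2 : m < ((10 : Nat) ^ (k + 1) : Int) := by push_cast; exact h2
  have h1' : 10 ^ k ≤ m.toNat := by omega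
  have h2' : m.toNat < 10 ^ (k + 1) := by omega
  rw [dlen_band_nat k m.toNat h1' h2']
  push_cast; ring

-- decimal length equals log₁₀ + 1
lemma dlen_eq_log (n : Nat) (h : 1 ≤ n) :
    (Nat.toDigits 10 n).length = Nat.log 10 n + 1 :=
  dlen_band_nat (Nat.log 10 n) n (Nat.pow_log_le_self 10 (by omega))
    (Nat.lt_pow_succ_log_self (by norm_num) n)

lemma log_step (k : Nat) (h : 1 ≤ k) : Nat.log 10 (k + 1) ≤ Nat.log 10 k + 1 := by
  have h1 : 10 ^ Nat.log 10 k ≤ k := Nat.pow_log_le_self 10 (by omega)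
  have hlt : k + 1 < 10 ^ (Nat.log 10 k + 2) := by
    have e : 10 ^ (Nat.log 10 k + 2) = 10 ^ Nat.log 10 k * 100 := by ring
    have h2 : k < 10 ^ (Nat.log 10 k + 1) := Nat.lt_pow_succ_log_self (by norm_num) k
    have e2 : 10 ^ (Nat.log 10 k + 1) = 10 ^ Nat.log 10 k * 10 := by ring
    rw [e2] at h2
    have hb1 : 1 ≤ 10 ^ Nat.log 10 k := Nat.one_le_pow _ _ (by norm_num)
    rw [e]; omega
  have := Nat.log_lt_of_lt_pow (by omega) hlt
  omega

lemma log_sub_le (m n : Nat) (hm : 1 ≤ m) (hmn : m ≤ n) :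
    Nat.log 10 n ≤ Nat.log 10 m + (n - m) := by
  induction n with
  | zero => omega
  | succ p ih =>
    rcases Nat.lt_or_ge p m with h | h
    · have : m = p + 1 := by omega
      subst this; omega
    · have h1 := ih (by omega)
      have h2 := log_step p (by omega)
      omega

-- price strictly increasing on [1, ∞) when 1 ≤ A and 1 ≤ A + B
lemma fI_strict (A B : Int) (hA : 1 ≤ A) (hAB : 1 ≤ A + B)
    (m n : Int) (hm : 1 ≤ m) (hmn : m < n) : fI A B m < fI A B n := by
  unfold fI
  set dm : Int := ((Nat.toDigits 10 m.toNat).length : Int) with hdm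
  set dn : Int := ((Nat.toDigits 10 n.toNat).length : Int) with hdn
  have hm' : 1 ≤ m.toNat := by omega
  have hmn' : m.toNat ≤ n.toNat := by omega
  have hmono : Nat.log 10 m.toNat ≤ Nat.log 10 n.toNat := Nat.log_mono_right hmn'
  have hsub := log_sub_le m.toNat n.toNat hm' hmn'
  have e1 : dm = (Nat.log 10 m.toNat : Int) + 1 := by rw [hdm, dlen_eq_log _ hm']; push_cast; ring
  have e2 : dn = (Nat.log 10 n.toNat : Int) + 1 := by
    rw [hdn, dlen_eq_log _ (le_trans hm' hmn')]; push_cast; ring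
  have hd1 : dm ≤ dn := by omega
  have hd2 : dn - dm ≤ n - m := by omega
  rcases le_or_gt 0 B with hB | hB
  · nlinarith
  · nlinarith

lemma fI_down (A B X : Int) (hA : 1 ≤ A) (hAB : 1 ≤ A + B)
    (m n : Int) (hm : 1 ≤ m) (hmn : m ≤ n) (hP : fI A B n ≤ X) : fI A B m ≤ X := by
  rcases lt_or_eq_of_le hmn with h | h
  · exact le_of_lt (lt_of_lt_of_le (fI_strict A B hA hAB m n hm h) hP)
  · exact h ▸ hP

-- the characterisation both programs satisfy: 0 when nothing is affordable, else
-- the largest affordable n in [1, 10^9]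
def Good (A B X : Int) (v : Int) : Prop :=
  (v = 0 ∧ ¬ fI A B 1 ≤ X) ∨
  (1 ≤ v ∧ v ≤ 10 ^ 9 ∧ fI A B v ≤ X ∧ (v = 10 ^ 9 ∨ ¬ fI A B (v + 1) ≤ X))

lemma Good_unique (A B X : Int) (hA : 1 ≤ A) (hAB : 1 ≤ A + B)
    (v w : Int) (hv : Good A B X v) (hw : Good A B X w) : v = w := by
  have key : ∀ a b : Int, Good A B X a → Good A B X b → a ≤ b := by
    intro a b ha hb
    rcases ha with ⟨ha0, hnP1⟩ | ⟨ha1, ha9, haP, halast⟩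
    · rcases hb with ⟨hb0, _⟩ | ⟨hb1, _, hbP, _⟩
      · omega
      · exact absurd (fI_down A B X hA hAB 1 b (by omega) hb1 hbP) hnP1
    · rcases hb with ⟨hb0, hnP1⟩ | ⟨hb1, hb9, hbP, hblast⟩
      · exact absurd (fI_down A B X hA hAB 1 a (by omega) ha1 haP) hnP1
      · by_contra hab
        rcases hblast with h9 | hnext
        · omega
        · exact hnext (fI_down A B X hA hAB (b + 1) a (by omega) (by omega) haP)
  exact le_antisymm (key v w hv hw) (key w v hw hv)

-- A's loop, under the binary-search invariant, lands on the Good value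
lemma loop_good (A B X : Int) (hA : 1 ≤ A) (hAB : 1 ≤ A + B) :
    ∀ (t : Nat) (l r ans : Int), (r + 1 - l).toNat = t →
    1 ≤ l → l ≤ r + 1 → r ≤ 10 ^ 9 → ans = l - 1 →
    (∀ m, 1 ≤ m → m < l → fI A B m ≤ X) →
    (∀ m, r < m → m ≤ 10 ^ 9 → ¬ fI A B m ≤ X) →
    Good A B X (solveLoop A B X l r ans) := by
  intro t
  induction t using Nat.strong_induction_on with
  | _ t ih =>
    intro l r ans ht hl hlr hr hans hlow hhigh
    rw [solveLoop]
    by_cases h : l ≤ r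
    · simp only [h, dite_true]
      have hmid := PySem.Int.floordiv_two_mid_bounds h
      set n := PySem.Int.floordiv (l + r) 2 with hn
      have hn0 : 0 ≤ n := by omega
      have hpe : calc_price A B n = fI A B n := calc_price_eq A B n hn0
      by_cases he : X = calc_price A B n
      · simp only [he, ite_true]
        right
        refine ⟨by omega, by omega, by rw [hpe] at he; omega, ?_⟩
        by_cases h9 : n = 10 ^ 9
        · exact Or.inl h9
        · right
          have := fI_strict A B hA hAB n (n + 1) (by omega) (by omega)
          rw [hpe] at he; omega
      · simp only [he, ite_false]
        by_cases hlt : X < calc_price A B n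
        · simp only [hlt, ite_true]
          apply ih ((n - 1) + 1 - l).toNat (by omega) l (n - 1) ans (by rfl) hl (by omega)
            (by omega) hans hlow
          intro m hm hm9 hPm
          have hfn : X < fI A B n := by rw [hpe] at hlt; omega
          rcases eq_or_lt_of_le (by omega : n ≤ m) with he2 | hlt2
          · rw [← he2] at hPm; omega
          · have := fI_strict A B hA hAB n m (by omega) hlt2
            omega
        · simp only [hlt, ite_false]
          have hgt : calc_price A B n < X := by omega
          apply ih (r + 1 - (n + 1)).toNat (by omega) (n + 1) r n (by rfl) (by omega) (by omega)
            hr (by omega) ?_ hhigh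
          intro m hm hmlt
          have : fI A B n ≤ X := by rw [hpe] at hgt; omega
          exact fI_down A B X hA hAB m n hm (by omega) this
    · simp only [h, dite_false]
      have hlr' : l = r + 1 := by omega
      have hansr : ans = r := by omega
      rw [hansr]
      by_cases hr0 : r = 0
      · left
        exact ⟨hr0, hhigh 1 (by omega) (by norm_num)⟩
      · right
        refine ⟨by omega, by omega, hlow r (by omega) (by omega), ?_⟩
        by_cases h9 : r = 10 ^ 9
        · left; omega
        · right; exact hhigh (r + 1) (by omega) (by omega)

-- B's fold body, named for the proofs
def bodyFn (A B X : Int) (st : Int × Int) (d : Int) : Int × Int :=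
  let hi := min ((10 : Int) ^ d.toNat - 1) (10 ^ 9)
  let cand := min hi (PySem.Int.floordiv (X - B * d) A)
  (if st.2 ≤ cand then max st.1 cand else st.1, (10 : Int) ^ d.toNat)

lemma solve_alt_eq (A B X : Int) :
    solve_alt A B X = ((PySem.List.pyRange 1 11 1).foldl (bodyFn A B X) (0, 1)).1 := rfl

-- B's invariant after the bands of 1..k digits
def BInv (A B X : Int) (k : Nat) (best : Int) : Prop :=
  (best = 0 ∨ (1 ≤ best ∧ best ≤ min ((10 : Int) ^ k - 1) (10 ^ 9) ∧ fI A B best ≤ X)) ∧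
  (∀ m : Int, 1 ≤ m → m ≤ min ((10 : Int) ^ k - 1) (10 ^ 9) → fI A B m ≤ X → m ≤ best)

-- affordability on the (k+1)-digit band is a cut at the floor quotient
lemma band_iff (A B X : Int) (hA : 1 ≤ A) (k : Nat) (m : Int)
    (h1 : (10 : Int) ^ k ≤ m) (h2 : m < 10 ^ (k + 1)) :
    (fI A B m ≤ X ↔ m ≤ PySem.Int.floordiv (X - B * ((k : Int) + 1)) A) := by
  rw [PySem.Int.le_floordiv_iff_mul_le (by omega)]
  unfold fI
  rw [dlen_band k m h1 h2]
  constructor <;> intro h <;> nlinarith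

lemma inv_step (A B X : Int) (hA : 1 ≤ A) (k : Nat) (hk : k ≤ 9)
    (best : Int) (h : BInv A B X k best) :
    BInv A B X (k + 1) ((bodyFn A B X (best, (10 : Int) ^ k) ((k : Int) + 1)).1) := by
  have htn : (((k : Int) + 1)).toNat = k + 1 := by omega
  obtain ⟨h1, h2⟩ := h
  have hp1 : (1 : Int) ≤ 10 ^ k := one_le_pow₀ (by norm_num)
  have hpk9 : (10 : Int) ^ k ≤ 10 ^ 9 := pow_le_pow_right₀ (by norm_num) hk
  have hpk1 : (10 : Int) ^ (k + 1) = 10 * 10 ^ k := by ring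
  have hmin : min ((10 : Int) ^ k - 1) (10 ^ 9) = 10 ^ k - 1 := by omega
  set q := PySem.Int.floordiv (X - B * ((k : Int) + 1)) A with hq
  simp only [bodyFn, htn]
  set hi := min ((10 : Int) ^ (k + 1) - 1) (10 ^ 9) with hhi
  set cand := min hi q with hcand
  have hhi9 : hi ≤ 10 ^ 9 := min_le_right _ _
  have hhik : hi ≤ 10 ^ (k + 1) - 1 := min_le_left _ _
  have hhige : (10 : Int) ^ k - 1 ≤ hi := by
    have h9 : (10 : Int) ^ (k + 1) ≤ 10 ^ 10 := pow_le_pow_right₀ (by norm_num) (by omega)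
    have : (10 : Int) ^ k ≤ 10 ^ (k + 1) := by nlinarith
    omega
  have hbandP : ∀ m : Int, (10 : Int) ^ k ≤ m → m ≤ hi → (fI A B m ≤ X ↔ m ≤ q) := by
    intro m hm1 hm2
    exact band_iff A B X hA k m hm1 (by omega)
  constructor
  · by_cases hc : (10 : Int) ^ k ≤ cand
    · simp only [hc, if_true]
      right
      refine ⟨by omega, ?_, ?_⟩
      · have : best ≤ 10 ^ k - 1 ∨ best = 0 := by
          rcases h1 with h | h
          · right; exact h
          · left; omega
        simp only [le_min_iff]
        constructor <;> omega
      · rcases max_choice best cand with hmx | hmx <;> rw [hmx]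
        · rcases h1 with h | h
          · omega
          · exact h.2.2
        · exact (hbandP cand hc (min_le_left _ _)).2 (min_le_right _ _)
    · simp only [hc, if_false]
      rcases h1 with h | h
      · left; exact h
      · right; exact ⟨h.1, by omega, h.2.2⟩
  · intro m hm hmle hPm
    by_cases hband : (10 : Int) ^ k ≤ m
    · have hmq : m ≤ q := (hbandP m hband (by omega)).1 hPm
      have hmc : m ≤ cand := by omega
      have hc : (10 : Int) ^ k ≤ cand := by omega
      simp only [hc, if_true]
      omega
    · have hmb : m ≤ best := h2 m hm (by omega) hPm
      by_cases hc : (10 : Int) ^ k ≤ cand <;> simp only [hc, if_true, if_false] <;> omega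

lemma fold_inv (A B X : Int) (hA : 1 ≤ A) :
    ∀ (t j : Nat) (st : Int × Int), j + t = 10 → st.2 = (10 : Int) ^ j → BInv A B X j st.1 →
    BInv A B X 10 (((PySem.List.pyRange ((j : Int) + 1) 11 1).foldl (bodyFn A B X) st).1) := by
  intro t
  induction t with
  | zero =>
    intro j st hj hst hinv
    have : j = 10 := by omega
    subst this
    rw [PySem.List.pyRange_one_eq_nil (by norm_num)]
    exact hinv
  | succ t ih =>
    intro j st hj hst hinv
    have hlt : ((j : Int) + 1) < 11 := by omega
    rw [PySem.List.pyRange_one_cons hlt, List.foldl_cons]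
    have hbody : bodyFn A B X st ((j : Int) + 1)
        = bodyFn A B X (st.1, (10 : Int) ^ j) ((j : Int) + 1) := by rw [← hst]
    rw [hbody]
    have hstep := inv_step A B X hA j (by omega) st.1 hinv
    have harr : ((j : Int) + 1) + 1 = (((j + 1 : Nat) : Int) + 1) := by push_cast; ring
    rw [harr]
    apply ih (j + 1) _ (by omega) _ hstep
    simp only [bodyFn]
    have htn : (((j : Int) + 1)).toNat = j + 1 := by omega
    rw [htn]

lemma alt_good (A B X : Int) (hA : 1 ≤ A) : Good A B X (solve_alt A B X) := by
  rw [solve_alt_eq]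
  set v := ((PySem.List.pyRange 1 11 1).foldl (bodyFn A B X) (0, 1)).1 with hv
  have h0 : ((0 : Nat) : Int) + 1 = 1 := by norm_num
  have hinv0 : BInv A B X 0 (0 : Int) := by
    constructor
    · left; rfl
    · intro m hm hmle _
      simp only [pow_zero] at hmle
      omega
  have hfold := fold_inv A B X hA 10 0 (0, 1) (by omega) (by norm_num) hinv0
  rw [h0] at hfold
  rw [← hv] at hfold
  obtain ⟨h1, h2⟩ := hfold
  have hmin : min ((10 : Int) ^ 10 - 1) (10 ^ 9) = 10 ^ 9 := by norm_num
  rw [hmin] at h1 h2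
  rcases h1 with h | ⟨hb1, hb9, hbP⟩
  · left
    refine ⟨h, fun hP1 => ?_⟩
    have := h2 1 (by norm_num) (by norm_num) hP1
    omega
  · right
    refine ⟨hb1, hb9, hbP, ?_⟩
    by_cases h9 : v = 10 ^ 9
    · left; exact h9
    · right
      intro hPn
      have := h2 (v + 1) (by omega) (by omega) hPn
      omega

-- ===== VERDICT (by name: the statement is the Claim_ definition above) =====
theorem solve_spec : Claim_equal_solve := by
  intro A B X _ hPre
  obtain ⟨hA, hAB⟩ := hPre
  have h1 : Good A B X (solve A B X) := by
    unfold solve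
    apply loop_good A B X hA hAB ((10 ^ 9 : Int) + 1 - 1).toNat 1 (10 ^ 9) 0 rfl
      (by norm_num) (by norm_num) (by norm_num) (by norm_num)
    · intro m hm hlt; omega
    · intro m hgt hle; omega
  have h2 : Good A B X (solve_alt A B X) := alt_good A B X hA
  exact Good_unique A B X hA hAB _ _ h1 h2
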